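-- pv_equiv track=rewrite | github.com/birc-gsa-2022/project-4-python-ms-world-wides | src/fm.py | bwt_C_O
-- ===== SOURCE A (Python) =====
-- def suffixArray(x: str) -> list:
--     """Given x return suffix array SA(x).
--        We use Python's sorted function here
--        for simplycity, but we can do better.
--
--     Args:
--         x (str): input string.
--     """
--     satups = sorted([(x[i:], i) for i in range(len(x))])
--
--     return list(map(lambda t: t[1], satups))
--
-- def count_to_bucket(count: str) -> dict:
--     '''
--     >>> count_to_bucket("$iiiimppss")
--     bucket = {$ : 0, i : 1, m : 5, p : 6, s : 8}
--     '''
--     C = {}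
--     for i,c in enumerate(count):
--         if c in C:
--             continue
--         else:
--             C[c] = i
--
--     return C
--
-- def bwt_C_O(x: str) -> tuple():
--
--     x += '$'
--     sa = suffixArray(x)
--     col = len(x)-1 # column at the back
--
--     bwt = ''.join([x[(i + col)%len(x)] for i in sa])
--     count = ''.join([x[i] for i in sa])
--     C = count_to_bucket(count) # dict with cumulative counts
--     O = calc_O(bwt, C) # dict (table) with offsets
--     return sa, C , O
--
-- def calc_O(bwt: str, C: dict) -> dict:
--     '''
--     >>>calc_O('aaba$')
--     O = { '$' : [0, 0, 0, 1, 1, 1], 'a' : [0, 1, 1, 1, 2, 3], 'b' : [0, 0, 1, 1, 1, 1]}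
--     '''
--     O = C.copy()
--     for k in O.keys():
--         O[k] = [0]
--
--     for char in bwt:
--         for k in O.keys():
--             if k == char:
--                 O[k].append(O[k][-1]+1)
--             else:
--                 O[k].append(O[k][-1])
--
--     return O
-- ===== SOURCE B (Python) =====
-- def bwt_C_O(x: str) -> tuple():
--     x += '$'
--     n = len(x)
--     # suffix array: sort the indices directly, keyed by the suffix
--     sa = sorted(range(n), key=lambda i: x[i:])
--     # last column: the character preceding each suffix (wraps for i == 0)
--     bwt = ''.join(x[i - 1] for i in sa)
--     # character frequencies of x, then C by cumulating counts in sorted key order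
--     freq = {}
--     for c in x:
--         freq[c] = freq.get(c, 0) + 1
--     C = {}
--     total = 0
--     for c in sorted(freq):
--         C[c] = total
--         total += freq[c]
--     # O: one running-count pass over bwt per character
--     O = {}
--     for c in C:
--         run = [0]
--         acc = 0
--         for b in bwt:
--             if b == c:
--                 acc += 1
--             run.append(acc)
--         O[c] = run
--     return sa, C, O
-- ===== Notes on version B (the rewrite author's own statement) =====
-- stated objective: alternative
-- what changed: B sorts the suffix indices directly with the suffix as sort key instead of sorting (suffix, index) pairs and projecting, derives the C table by cumulating character frequencies in sorted key order instead of scanning a materialised first-column string for first-occurrence positions, and builds each O row with one running-count pass per character instead of updating every dict key at every BWT position.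
import Mathlib
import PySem

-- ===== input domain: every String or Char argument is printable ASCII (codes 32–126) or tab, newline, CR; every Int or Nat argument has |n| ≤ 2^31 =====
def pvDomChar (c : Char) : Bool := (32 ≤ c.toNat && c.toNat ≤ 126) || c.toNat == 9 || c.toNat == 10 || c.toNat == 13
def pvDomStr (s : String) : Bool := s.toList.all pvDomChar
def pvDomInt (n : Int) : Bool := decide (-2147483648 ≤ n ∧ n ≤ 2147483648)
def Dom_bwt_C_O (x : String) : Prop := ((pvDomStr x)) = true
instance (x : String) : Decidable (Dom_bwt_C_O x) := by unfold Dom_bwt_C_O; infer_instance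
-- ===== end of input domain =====

-- B replaces A's pair-sort suffix array by a keyed index sort, A's count-string/first-occurrence
-- C table by cumulated character frequencies, and A's per-position scan over all dict keys in
-- calc_O by one running-count pass per character (objective: alternative decomposition).

-- ===== PORT A =====
-- A: satups = sorted([(x[i:], i) for i in range(len(x))]); Python sorts the pairs
-- lexicographically, i.e. by key (x[i:], i) — ported with sorted2 on the two projections.
def pvSuffixArray (x : String) : List Int :=
  (PySem.List.sorted2
      ((PySem.List.pyRange 0 (PySem.Str.len x) 1).map
        (fun i => (PySem.Str.slice x (some i) none, i)))
      (fun t => t.1) (fun t => t.2)).map (fun t => t.2)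

def pvBucketStep (C : PySem.Dict Char Int) (p : Int × Char) : PySem.Dict Char Int :=
  if C.contains p.2 then C else C.insert p.2 p.1

def pvCountToBucket (count : List Char) : PySem.Dict Char Int :=
  (PySem.List.enumerate count).foldl pvBucketStep PySem.Dict.empty

-- O = C.copy(); for k in O.keys(): O[k] = [0]  — the copy's values change type (int → list),
-- so the copy-then-reset is written as one items map; the key order is exactly C's.
def pvCalcOInit (C : PySem.Dict Char Int) : PySem.Dict Char (List Int) :=
  PySem.Dict.mk (C.items.map (fun p => (p.1, ([0] : List Int))))

def pvCalcOStep (O : PySem.Dict Char (List Int)) (ch : Char) : PySem.Dict Char (List Int) :=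
  O.keys.foldl (fun acc k =>
    if k == ch then acc.modify k [] (fun l => l ++ [PySem.List.pyGetD l (-1) 0 + 1])
    else acc.modify k [] (fun l => l ++ [PySem.List.pyGetD l (-1) 0])) O

def pvCalcO (bwt : List Char) (C : PySem.Dict Char Int) : PySem.Dict Char (List Int) :=
  bwt.foldl pvCalcOStep (pvCalcOInit C)

-- x[(i+col) % len(x)] and x[i]: the index is provably in range (mod of a positive length,
-- resp. a suffix-array entry), so the total pyGetD with a dummy default is exact here.
def bwt_C_O (x : String) : List Int × (List (String × Int)) × (List (String × List Int)) :=
  let x' := x ++ "$"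
  let xs := x'.toList
  let sa := pvSuffixArray x'
  let col : Int := PySem.Str.len x' - 1
  let bwt := sa.map (fun i => PySem.List.pyGetD xs (PySem.Int.mod (i + col) (PySem.Str.len x')) ' ')
  let count := sa.map (fun i => PySem.List.pyGetD xs i ' ')
  let C := pvCountToBucket count
  let O := pvCalcO bwt C
  (sa, C.items.map (fun p => (String.ofList [p.1], p.2)),
       O.items.map (fun p => (String.ofList [p.1], p.2)))

-- ===== PORT B =====
-- run = [0]; acc = 0; for b in bwt: acc += (b == c); run.append(acc)
def pvAltRun (bwt : List Char) (c : Char) : List Int :=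
  (bwt.foldl (fun (p : List Int × Int) b =>
      let acc := if b == c then p.2 + 1 else p.2
      (p.1 ++ [acc], acc)) ([0], 0)).1

def bwt_C_O_alt (x : String) : List Int × (List (String × Int)) × (List (String × List Int)) :=
  let x' := x ++ "$"
  let xs := x'.toList
  let n : Int := PySem.Str.len x'
  let sa := PySem.List.sorted (PySem.List.pyRange 0 n 1)
              (fun i => PySem.Str.slice x' (some i) none) false
  let bwt := sa.map (fun i => PySem.List.pyGetD xs (i - 1) ' ')   -- x[i-1], wraps for i = 0
  let freq := xs.foldl (fun d c => d.insert c (d.getD c 0 + 1)) PySem.Dict.empty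
  let C := (PySem.List.sorted freq.keys (fun c => c) false).foldl
              (fun (p : PySem.Dict Char Int × Int) c =>
                (p.1.insert c p.2, p.2 + freq.getD c 0)) (PySem.Dict.empty, 0) |>.1
  let O := C.keys.foldl (fun d c => d.insert c (pvAltRun bwt c)) PySem.Dict.empty
  (sa, C.items.map (fun p => (String.ofList [p.1], p.2)),
       O.items.map (fun p => (String.ofList [p.1], p.2)))

-- ===== PRECONDITION & SPEC =====
def Spec_bwt_C_O (x : String) (out : List Int × (List (String × Int)) × (List (String × List Int))) : Prop := out = bwt_C_O_alt x
instance (x : String) (out : List Int × (List (String × Int)) × (List (String × List Int))) : Decidable (Spec_bwt_C_O x out) := by unfold Spec_bwt_C_O; infer_instance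

-- ===== CLAIM (what is proved, stated in full; the proofs are below) =====
def Claim_equal_bwt_C_O : Prop := ∀ (x : String), Dom_bwt_C_O x → Spec_bwt_C_O x (bwt_C_O x)

-- ===== LEMMAS AND PROOFS =====

-- proof-only abbreviations
def pvXs (x : String) : List Char := (x ++ "$").toList
def pvKey (x : String) (i : Int) : String := PySem.Str.slice (x ++ "$") (some i) none
def pvYs (x : String) : List Int :=
  PySem.List.sorted (PySem.List.pyRange 0 (PySem.Str.len (x ++ "$")) 1) (pvKey x) false
def pvCs (x : String) : List Char := (pvYs x).map (fun i => PySem.List.pyGetD (pvXs x) i ' ')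
def pvOcol (bs : List Char) (k : Char) : List Int :=
  0 :: (List.range bs.length).map (fun j => ((bs.take (j + 1)).count k : Int))
def pvCanon (cnt : Char → Int) : List Char → Int → List (Char × Int)
  | [], _ => []
  | c :: r, t => (c, t) :: pvCanon cnt r (t + cnt c)

-- `insertBy` only evaluates `before x ·` on members of the list
lemma pv_insertBy_congr {α : Type} (f g : α → α → Bool) (x : α) (l : List α)
    (h : ∀ b ∈ l, f x b = g x b) :
    PySem.List.insertBy f x l = PySem.List.insertBy g x l := by
  induction l with
  | nil => rfl
  | cons y ys ih =>
    simp only [PySem.List.insertBy]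
    rw [h y (by simp)]
    by_cases hc : g x y = true
    · simp [hc]
    · simp only [Bool.not_eq_true] at hc
      simp [hc, ih (fun b hb => h b (by simp [hb]))]

lemma pv_foldl_insertBy_congr {α : Type} (f g : α → α → Bool) (S : List α)
    (h : ∀ a ∈ S, ∀ b ∈ S, f a b = g a b) :
    ∀ (l acc : List α), (∀ a ∈ l, a ∈ S) → (∀ b ∈ acc, b ∈ S) →
      l.foldl (fun acc x => PySem.List.insertBy f x acc) acc
        = l.foldl (fun acc x => PySem.List.insertBy g x acc) acc := by
  intro l
  induction l with
  | nil => intro acc _ _; rfl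
  | cons x t ih =>
    intro acc hl hacc
    simp only [List.foldl_cons]
    rw [pv_insertBy_congr f g x acc (fun b hb => h x (hl x (by simp)) b (hacc b hb))]
    exact ih _ (fun a ha => hl a (by simp [ha]))
      (fun b hb => by
        rcases (PySem.List.mem_insertBy _ _ _ _).1 hb with rfl | hb'
        · exact hl b (by simp)
        · exact hacc _ hb')

-- Python's pair sort is the key-only sort when the first key is injective on the list
lemma pv_sorted2_eq_sorted {α κ₁ κ₂ : Type} [LinearOrder κ₁] [LinearOrder κ₂]
    (xs : List α) (k1 : α → κ₁) (k2 : α → κ₂)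
    (hinj : ∀ a ∈ xs, ∀ b ∈ xs, k1 a = k1 b → a = b) :
    PySem.List.sorted2 xs k1 k2 = PySem.List.sorted xs k1 := by
  rw [PySem.List.sorted_eq_foldl_insertBy]
  show xs.foldl (fun acc x => PySem.List.insertBy
        (fun a b => decide (k1 a < k1 b) || (!decide (k1 b < k1 a) && decide (k2 a < k2 b)))
        x acc) [] = _
  refine pv_foldl_insertBy_congr _ _ xs ?_ xs [] (fun a ha => ha) (by simp)
  intro a ha b hb
  by_cases h1 : k1 a < k1 b
  · simp [h1]
  · by_cases h2 : k1 b < k1 a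
    · simp [h1, h2]
    · have hab : a = b := hinj a ha b hb (le_antisymm (not_lt.1 h2) (not_lt.1 h1))
      subst hab
      simp

lemma pv_xs_len (x : String) : PySem.Str.len (x ++ "$") = ((pvXs x).length : Int) := by
  rw [PySem.Str.len_eq]; rfl

lemma pv_key_toList (x : String) {i : Int} (h0 : 0 ≤ i) :
    (pvKey x i).toList = (pvXs x).drop i.toNat := by
  unfold pvKey
  rw [PySem.Str.toList_slice]
  simp only [PySem.Chars.slice_eq_listSlice]
  exact PySem.List.slice_from _ h0

lemma pv_key_inj (x : String) {i j : Int}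
    (hi0 : 0 ≤ i) (hi : i < ((pvXs x).length : Int))
    (hj0 : 0 ≤ j) (hj : j < ((pvXs x).length : Int))
    (h : pvKey x i = pvKey x j) : i = j := by
  have h' := congrArg (fun s => s.toList.length) h
  simp only [pv_key_toList x hi0, pv_key_toList x hj0, List.length_drop] at h'
  omega

lemma pv_key_head (x : String) {i j : Int}
    (hi0 : 0 ≤ i) (hi : i < ((pvXs x).length : Int))
    (hj0 : 0 ≤ j) (hj : j < ((pvXs x).length : Int))
    (hle : pvKey x i ≤ pvKey x j) :
    PySem.List.pyGetD (pvXs x) i ' ' ≤ PySem.List.pyGetD (pvXs x) j ' ' := by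
  have hi' : i.toNat < (pvXs x).length := by omega
  have hj' : j.toNat < (pvXs x).length := by omega
  rw [PySem.List.pyGetD_eq_getElem _ _ hi0 hi, PySem.List.pyGetD_eq_getElem _ _ hj0 hj]
  rcases lt_or_eq_of_le hle with hlt | heq
  · have hlt' : (pvKey x i).toList < (pvKey x j).toList := String.lt_iff_toList_lt.mp hlt
    rw [pv_key_toList x hi0, pv_key_toList x hj0,
        List.drop_eq_getElem_cons hi', List.drop_eq_getElem_cons hj',
        List.cons_lt_cons_iff] at hlt'
    rcases hlt' with h | ⟨h, _⟩
    · exact le_of_lt h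
    · exact le_of_eq h
  · have h2 : (pvKey x i).toList = (pvKey x j).toList := by rw [heq]
    rw [pv_key_toList x hi0, pv_key_toList x hj0,
        List.drop_eq_getElem_cons hi', List.drop_eq_getElem_cons hj',
        List.cons.injEq] at h2
    exact le_of_eq h2.1

lemma pv_ys_perm (x : String) :
    (pvYs x).Perm (PySem.List.pyRange 0 (((pvXs x).length : Int)) 1) := by
  have := PySem.List.sorted_perm (PySem.List.pyRange 0 (PySem.Str.len (x ++ "$")) 1) (pvKey x) false
  rwa [pv_xs_len] at this

lemma pv_mem_ys (x : String) {i : Int} (h : i ∈ pvYs x) :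
    0 ≤ i ∧ i < ((pvXs x).length : Int) :=
  PySem.List.mem_pyRange_one.mp ((pv_ys_perm x).mem_iff.mp h)

lemma pv_ys_nodup (x : String) : (pvYs x).Nodup :=
  ((pv_ys_perm x).nodup_iff).mpr (PySem.List.nodup_pyRange_one 0 _)

lemma pv_ys_pairwise_le (x : String) :
    (pvYs x).Pairwise (fun a b => pvKey x a ≤ pvKey x b) :=
  PySem.List.sorted_pairwise _ _

lemma pv_ys_pairwise_lt (x : String) :
    (pvYs x).Pairwise (fun a b => pvKey x a < pvKey x b) := by
  have := (pv_ys_pairwise_le x).and (pv_ys_nodup x)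
  refine this.imp_of_mem ?_
  intro a b ha hb ⟨hle, hne⟩
  rcases lt_or_eq_of_le hle with h | h
  · exact h
  · exact absurd (pv_key_inj x (pv_mem_ys x ha).1 (pv_mem_ys x ha).2
      (pv_mem_ys x hb).1 (pv_mem_ys x hb).2 h) hne

lemma pv_sa_eq (x : String) : pvSuffixArray (x ++ "$") = pvYs x := by
  unfold pvSuffixArray
  rw [pv_sorted2_eq_sorted _ _ _ ?hinj]
  case hinj =>
    intro a ha b hb hk
    simp only [List.mem_map] at ha hb
    obtain ⟨i, hi, rfl⟩ := ha
    obtain ⟨j, hj, rfl⟩ := hb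
    rw [pv_xs_len] at hi hj
    rw [PySem.List.mem_pyRange_one] at hi hj
    have : i = j := pv_key_inj x hi.1 hi.2 hj.1 hj.2 hk
    subst this; rfl
  show (PySem.List.sorted
      ((PySem.List.pyRange 0 (PySem.Str.len (x ++ "$")) 1).map (fun i => (pvKey x i, i)))
      (fun t => t.1)).map (fun t => t.2) = pvYs x
  have hmain : PySem.List.sorted
      ((PySem.List.pyRange 0 (PySem.Str.len (x ++ "$")) 1).map
        (fun i => (pvKey x i, i)))
      (fun t => t.1) = (pvYs x).map (fun i => (pvKey x i, i)) := by
    apply PySem.List.sorted_eq_of_perm_of_pairwise_lt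
    · exact ((pv_ys_perm x).map _).trans (by rw [pv_xs_len])
    · rw [List.pairwise_map]
      exact pv_ys_pairwise_lt x
  rw [hmain, List.map_map]
  simp [Function.comp_def]

lemma pv_cs_perm (x : String) : (pvCs x).Perm (pvXs x) := by
  unfold pvCs
  have h1 := (pv_ys_perm x).map (fun i => PySem.List.pyGetD (pvXs x) i ' ')
  have h2 : (PySem.List.pyRange 0 (((pvXs x).length : Int)) 1).map
      (fun i => PySem.List.pyGetD (pvXs x) i ' ') = pvXs x := by
    have := PySem.List.map_pyGetD_pyRange_zero (pvXs x) ' '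
    simpa [PySem.List.len] using this
  rw [h2] at h1
  exact h1

lemma pv_cs_sorted (x : String) : (pvCs x).Pairwise (· ≤ ·) := by
  unfold pvCs
  rw [List.pairwise_map]
  refine (pv_ys_pairwise_le x).imp_of_mem ?_
  intro a b ha hb h
  exact pv_key_head x (pv_mem_ys x ha).1 (pv_mem_ys x ha).2
    (pv_mem_ys x hb).1 (pv_mem_ys x hb).2 h

lemma pv_enumerate_cons {α : Type} (c : α) (t : List α) (s : Int) :
    PySem.List.enumerate (c :: t) s = (s, c) :: PySem.List.enumerate t (s + 1) := by
  simp [PySem.List.enumerate]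

lemma pv_bucket_items (cs : List Char) : ∀ (s : Int) (d : PySem.Dict Char Int), d.keys.Nodup →
    ((PySem.List.enumerate cs s).foldl pvBucketStep d).items
      = d.items ++ ((PySem.Set.ofList cs).filter (fun c => !d.contains c)).map
          (fun c => (c, s + (List.idxOf c cs : Int))) := by
  induction cs with
  | nil =>
    intro s d _
    simp [PySem.List.enumerate, PySem.Set.ofList_nil]
  | cons c t ih =>
    intro s d hnd
    rw [pv_enumerate_cons]
    simp only [List.foldl_cons]
    by_cases hc : d.contains c = true
    · rw [show pvBucketStep d (s, c) = d from by simp [pvBucketStep, hc]]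
      rw [ih (s + 1) d hnd, PySem.Set.ofList_cons]
      congr 1
      rw [List.filter_cons]
      have hPc : (!d.contains c) = false := by simp [hc]
      rw [hPc]
      simp only [Bool.false_eq_true, if_false]
      have hdisc : (PySem.Set.ofList t).discard c
          = (PySem.Set.ofList t).filter (fun y => !(y == c)) := rfl
      rw [hdisc, List.filter_filter]
      have hflt : List.filter (fun a => (!d.contains a) && (!(a == c))) (PySem.Set.ofList t)
          = List.filter (fun c' => !d.contains c') (PySem.Set.ofList t) := by
        apply List.filter_congr
        intro a _
        by_cases hac : a = c
        · subst hac; simp [hc]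
        · simp [beq_eq_false_iff_ne.mpr hac]
      rw [hflt]
      apply List.map_congr_left
      intro a ha
      rcases List.mem_filter.mp ha with ⟨_, hP⟩
      have hac : (c == a) = false := by
        apply beq_eq_false_iff_ne.mpr
        intro h; subst h; simp [hc] at hP
      rw [List.idxOf_cons, hac]
      simp only [cond_false, Prod.mk.injEq, true_and]
      push_cast
      ring
    · have hc' : d.contains c = false := by simpa using hc
      rw [show pvBucketStep d (s, c) = d.insert c s from by simp [pvBucketStep, hc']]
      rw [ih (s + 1) (d.insert c s) (PySem.Dict.nodup_keys_insert d c s hnd)]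
      rw [PySem.Dict.items_insert_of_not_contains d s hc', PySem.Set.ofList_cons]
      rw [List.filter_cons]
      have hPc : (!d.contains c) = true := by simp [hc']
      rw [hPc]
      simp only [if_true]
      rw [List.append_assoc]
      congr 1
      rw [List.map_cons]
      have hidx : List.idxOf c (c :: t) = 0 := by simp
      rw [hidx]
      show (c, s) :: _ = (c, s + ((0 : Nat) : Int)) :: _
      congr 1
      · simp
      · have hdisc : (PySem.Set.ofList t).discard c
            = (PySem.Set.ofList t).filter (fun y => !(y == c)) := rfl
        rw [hdisc, List.filter_filter]
        have hfun : (fun c' => !(d.insert c s).contains c')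
            = (fun c' => !(c' == c) && !d.contains c') := by
          funext c'
          rw [PySem.Dict.contains_insert, Bool.not_or]
        rw [hfun]
        have hflt : List.filter (fun a => (!d.contains a) && (!(a == c))) (PySem.Set.ofList t)
            = List.filter (fun c' => (!(c' == c)) && (!d.contains c')) (PySem.Set.ofList t) := by
          apply List.filter_congr
          intro a _
          rw [Bool.and_comm]
        rw [hflt]
        apply List.map_congr_left
        intro a ha
        rcases List.mem_filter.mp ha with ⟨_, hP⟩
        have hac : (c == a) = false := by
          apply beq_eq_false_iff_ne.mpr
          intro h
          subst h
          simp at hP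
        rw [List.idxOf_cons, hac]
        simp only [cond_false, Prod.mk.injEq, true_and]
        push_cast
        ring

lemma pv_countToBucket_items (cs : List Char) :
    (pvCountToBucket cs).items
      = (PySem.Set.ofList cs).map (fun c => (c, (List.idxOf c cs : Int))) := by
  unfold pvCountToBucket
  rw [pv_bucket_items cs 0 PySem.Dict.empty (by rw [PySem.Dict.keys_empty]; exact List.nodup_nil)]
  simp [PySem.Dict.empty]

lemma pv_idxOf_sorted : ∀ (cs : List Char), cs.Pairwise (· ≤ ·) → ∀ c ∈ cs,
    List.idxOf c cs = cs.countP (fun e => decide (e < c)) := by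
  intro cs
  induction cs with
  | nil => intro _ c hc; cases hc
  | cons a t ih =>
    intro hs c hc
    rcases List.pairwise_cons.mp hs with ⟨ha, ht⟩
    rw [List.idxOf_cons, List.countP_cons]
    by_cases hac : a = c
    · subst hac
      simp only [beq_self_eq_true, cond_true]
      have h0 : t.countP (fun e => decide (e < a)) = 0 :=
        List.countP_eq_zero.mpr (fun e he hlt =>
          absurd (ha e he) (not_le.mpr (by simpa using hlt)))
      simp [h0]
    · have hmem : c ∈ t := by
        rcases List.mem_cons.mp hc with rfl | h
        · exact absurd rfl hac
        · exact h
      have hbeq : (a == c) = false := beq_eq_false_iff_ne.mpr hac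
      rw [hbeq]
      simp only [cond_false]
      have halt : a < c := lt_of_le_of_ne (ha c hmem) hac
      rw [ih ht c hmem]
      simp [halt]

lemma pv_countP_split {α : Type} (p q : α → Bool) (l : List α) :
    l.countP p = l.countP (fun a => p a && q a) + l.countP (fun a => p a && !q a) := by
  induction l with
  | nil => rfl
  | cons a t ih =>
    simp only [List.countP_cons]
    by_cases hp : p a <;> by_cases hq : q a <;> simp [hp, hq, ih] <;> omega

lemma pv_cfold_items (freq : PySem.Dict Char Int) :
    ∀ (l : List Char) (d : PySem.Dict Char Int) (t : Int),
      (∀ c ∈ l, d.contains c = false) → l.Nodup →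
      ((l.foldl (fun (p : PySem.Dict Char Int × Int) c =>
          (p.1.insert c p.2, p.2 + freq.getD c 0)) (d, t)).1).items
        = d.items ++ pvCanon (fun c => freq.getD c 0) l t := by
  intro l
  induction l with
  | nil => intro d t _ _; simp [pvCanon]
  | cons c r ih =>
    intro d t hf hnd
    simp only [List.foldl_cons]
    rw [ih (d.insert c t) (t + freq.getD c 0)
        (fun c' hc' => by
          rw [PySem.Dict.contains_insert]
          have hne : (c' == c) = false := beq_eq_false_iff_ne.mpr
            (by intro h; subst h; exact (List.nodup_cons.mp hnd).1 hc')
          simp [hne, hf c' (by simp [hc'])])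
        (List.nodup_cons.mp hnd).2]
    rw [PySem.Dict.items_insert_of_not_contains d t (hf c (by simp))]
    simp [pvCanon]

lemma pv_canon_eq_map : ∀ (l m : List Char) (cnt : Char → Int) (t : Int),
    l.Pairwise (· < ·) → (∀ e ∈ m, e ∈ l) → (∀ c ∈ l, cnt c = (m.count c : Int)) →
    pvCanon cnt l t
      = l.map (fun c => (c, t + (m.countP (fun e => decide (e < c)) : Int))) := by
  intro l
  induction l with
  | nil => intro m cnt t _ _ _; rfl
  | cons c r ih =>
    intro m cnt t hp hm hcnt
    rcases List.pairwise_cons.mp hp with ⟨hcr, hr⟩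
    have hcp0 : m.countP (fun e => decide (e < c)) = 0 := by
      apply List.countP_eq_zero.mpr
      intro e he hdec
      have helt : e < c := by simpa using hdec
      rcases List.mem_cons.mp (hm e he) with rfl | hmem
      · exact absurd helt (lt_irrefl _)
      · exact absurd helt (not_lt.mpr (le_of_lt (hcr e hmem)))
    show (c, t) :: pvCanon cnt r (t + cnt c) = _
    rw [List.map_cons]
    congr 1
    · rw [hcp0]
      simp
    · rw [ih (m.filter (fun e => !(e == c))) cnt (t + cnt c) hr
          (fun e he => by
            rcases List.mem_filter.mp he with ⟨hme, hne⟩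
            rcases List.mem_cons.mp (hm e hme) with rfl | hmem
            · simp at hne
            · exact hmem)
          (fun a ha => by
            rw [hcnt a (by simp [ha])]
            have hane : (!(a == c)) = true := by
              have : c < a := hcr a ha
              simp [beq_eq_false_iff_ne.mpr (ne_of_gt this)]
            rw [List.count_filter (p := fun e => !(e == c)) hane])]
      apply List.map_congr_left
      intro a ha
      have hca : c < a := hcr a ha
      have key : m.countP (fun e => decide (e < a))
          = m.count c + m.countP (fun e => decide (e < a) && !(e == c)) := by
        rw [pv_countP_split (fun e => decide (e < a)) (fun e => (e == c)) m]
        congr 1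
        rw [List.count_eq_countP]
        apply List.countP_congr
        intro e _
        constructor
        · intro h
          exact (Bool.and_elim_right h)
        · intro h
          have : e = c := by simpa using h
          subst this
          simp [hca]
      have key2 : m.countP (fun e => decide (e < a) && !(e == c))
          = (m.filter (fun e => !(e == c))).countP (fun e => decide (e < a)) := by
        rw [List.countP_filter]
      simp only [Prod.mk.injEq, true_and]
      rw [hcnt c (by simp), key, ← key2]
      push_cast
      ring

lemma pv_ofList_sublist {α : Type} [BEq α] [LawfulBEq α] :
    ∀ (l : List α), (PySem.Set.ofList l).Sublist l := by
  intro l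
  induction l with
  | nil => simp [PySem.Set.ofList_nil]
  | cons c t ih =>
    rw [PySem.Set.ofList_cons]
    refine List.Sublist.cons₂ c ?_
    exact List.Sublist.trans (List.filter_sublist (l := PySem.Set.ofList t)) ih

lemma pv_keys_eq (x : String) :
    PySem.List.sorted (((pvXs x).foldl (fun d c => d.insert c (d.getD c 0 + 1))
        PySem.Dict.empty : PySem.Dict Char Int)).keys (fun c => c) false
      = PySem.Set.ofList (pvCs x) := by
  rw [PySem.Dict.foldl_insert_getD_add_one_eq_counter, PySem.Dict.keys_counter]
  have hnd1 : (PySem.List.sorted (PySem.Set.ofList (pvXs x)) (fun c => c) false).Nodup :=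
    ((PySem.List.sorted_perm _ _ _).nodup_iff).mpr (PySem.Set.nodup_ofList _)
  have hnd2 : (PySem.Set.ofList (pvCs x)).Nodup := PySem.Set.nodup_ofList _
  have hlt1 := PySem.List.sorted_ofList_pairwise_lt (pvXs x)
  have hlt2 : (PySem.Set.ofList (pvCs x)).Pairwise (· < ·) := by
    have hle : (PySem.Set.ofList (pvCs x)).Pairwise (· ≤ ·) :=
      (pv_cs_sorted x).sublist (pv_ofList_sublist _)
    exact (hle.and hnd2).imp (fun h => lt_of_le_of_ne h.1 h.2)
  have hperm : (PySem.List.sorted (PySem.Set.ofList (pvXs x)) (fun c => c) false).Perm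
      (PySem.Set.ofList (pvCs x)) := by
    rw [List.perm_ext_iff_of_nodup hnd1 hnd2]
    intro a
    rw [PySem.List.mem_sorted, PySem.Set.mem_ofList, PySem.Set.mem_ofList]
    exact Iff.symm ((pv_cs_perm x).mem_iff)
  exact PySem.List.eq_of_perm_of_pairwise_le_of_injective (fun c => c)
    (fun a b h => h) hperm (hlt1.imp le_of_lt) (hlt2.imp le_of_lt)

lemma pv_ocol_concat (bs : List Char) (b k : Char) :
    pvOcol (bs ++ [b]) k
      = pvOcol bs k ++ [((bs.count k : Int) + if b == k then 1 else 0)] := by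
  unfold pvOcol
  simp only [List.length_append, List.length_cons, List.length_nil, Nat.zero_add]
  rw [List.range_succ, List.map_append]
  rw [List.cons_append]
  congr 1
  congr 1
  · apply List.map_congr_left
    intro j hj
    have : j + 1 ≤ bs.length := by
      have := List.mem_range.mp hj
      omega
    rw [List.take_append_of_le_length this]
  · rw [List.map_singleton]
    rw [List.take_of_length_le (by simp)]
    rw [List.count_append]
    congr 1
    push_cast
    congr 1
    by_cases hbk : (b == k) = true
    · have : b = k := eq_of_beq hbk
      subst this
      simp
    · have : b ≠ k := by simpa using hbk
      simp [hbk, this]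

lemma pv_ocol_last (bs : List Char) (k : Char) :
    PySem.List.pyGetD (pvOcol bs k) (-1) 0 = (bs.count k : Int) := by
  induction bs using List.reverseRecOn with
  | nil =>
    show PySem.List.pyGetD ([] ++ [(0 : Int)]) (-1) 0 = _
    rw [PySem.List.pyGetD_neg_one_append_singleton]
    simp
  | append_singleton bs b _ =>
    rw [pv_ocol_concat, PySem.List.pyGetD_neg_one_append_singleton, List.count_append]
    push_cast
    congr 1
    by_cases hbk : (b == k) = true
    · have : b = k := eq_of_beq hbk
      subst this
      simp
    · have : b ≠ k := by simpa using hbk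
      simp [hbk, this]

lemma pv_items_foldl_modify (g : Char → List Int → List Int) :
    ∀ (ks : List Char) (d : PySem.Dict Char (List Int)), ks.Nodup → d.keys.Nodup →
      (∀ k ∈ ks, d.contains k = true) →
      (ks.foldl (fun acc k => acc.modify k [] (g k)) d).items
        = d.items.map (fun p => if p.1 ∈ ks then (p.1, g p.1 p.2) else p) := by
  intro ks
  induction ks with
  | nil =>
    intro d _ _ _
    simp
  | cons k r ih =>
    intro d hnd hdk hcont
    simp only [List.foldl_cons]
    have hck : d.contains k = true := hcont k (by simp)
    have hd1items : (d.modify k [] (g k)).items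
        = d.items.map (fun p => if p.1 = k then (p.1, g p.1 p.2) else p) := by
      show (d.insert k (g k (d.getD k []))).items = _
      rw [PySem.Dict.items_insert_of_contains d _ hck]
      apply List.map_congr_left
      intro p hp
      by_cases hpk : p.1 = k
      · have hpeq : p = (k, p.2) := by
          obtain ⟨p1, p2⟩ := p
          simp only at hpk
          rw [hpk]
        have hval : d.getD k [] = p.2 :=
          PySem.Dict.getD_of_mem_items d (hpeq ▸ hp) hdk []
        simp [hpk, hval]
      · simp [hpk, beq_eq_false_iff_ne.mpr hpk]
    have hkeys1 : (d.modify k [] (g k)).keys = d.keys := by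
      show ((d.modify k [] (g k)).items).map (fun p => p.1) = (d.items).map (fun p => p.1)
      rw [hd1items, List.map_map]
      apply List.map_congr_left
      intro p _
      by_cases hpk : p.1 = k <;> simp [hpk]
    rw [ih (d.modify k [] (g k)) (List.nodup_cons.mp hnd).2
        (by rw [hkeys1]; exact hdk)
        (fun k' hk' => by
          rw [PySem.Dict.contains_iff_mem_keys, hkeys1]
          exact (PySem.Dict.contains_iff_mem_keys _ _).mp (hcont k' (by simp [hk'])))]
    rw [hd1items, List.map_map]
    apply List.map_congr_left
    intro p _
    have hkr : k ∉ r := (List.nodup_cons.mp hnd).1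
    by_cases hpk : p.1 = k
    · simp [hpk, hkr]
    · by_cases hpr : p.1 ∈ r <;> simp [hpk, hpr]

lemma pv_calcOStep_items (C : PySem.Dict Char Int) (hnd : C.keys.Nodup)
    (bs : List Char) (b : Char) (O : PySem.Dict Char (List Int))
    (hitems : O.items = C.keys.map (fun k => (k, pvOcol bs k))) :
    (pvCalcOStep O b).items = C.keys.map (fun k => (k, pvOcol (bs ++ [b]) k)) := by
  have hOkeys : O.keys = C.keys := by
    show (O.items).map (fun p => p.1) = _
    rw [hitems, List.map_map]
    simp [Function.comp_def]
  unfold pvCalcOStep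
  have hbody : (fun (acc : PySem.Dict Char (List Int)) k =>
      if k == b then acc.modify k [] (fun l => l ++ [PySem.List.pyGetD l (-1) 0 + 1])
      else acc.modify k [] (fun l => l ++ [PySem.List.pyGetD l (-1) 0]))
      = (fun (acc : PySem.Dict Char (List Int)) k => acc.modify k []
          (fun l => if k == b then l ++ [PySem.List.pyGetD l (-1) 0 + 1]
                    else l ++ [PySem.List.pyGetD l (-1) 0])) := by
    funext acc k
    by_cases hkb : (k == b) = true
    · simp only [hkb, if_true]
    · simp only [hkb, Bool.false_eq_true, if_false]
  rw [hbody, hOkeys]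
  rw [pv_items_foldl_modify _ C.keys O hnd (by rw [hOkeys]; exact hnd)
      (fun k hk => by
        rw [PySem.Dict.contains_iff_mem_keys, hOkeys]
        exact hk)]
  rw [hitems, List.map_map]
  apply List.map_congr_left
  intro k hk
  simp only [Function.comp_def, if_pos hk]
  show (k, if k == b then pvOcol bs k ++ [PySem.List.pyGetD (pvOcol bs k) (-1) 0 + 1]
           else pvOcol bs k ++ [PySem.List.pyGetD (pvOcol bs k) (-1) 0])
      = (k, pvOcol (bs ++ [b]) k)
  rw [pv_ocol_concat, pv_ocol_last]
  by_cases hkb : (k == b) = true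
  · have : k = b := eq_of_beq hkb
    subst this
    simp
  · have hne : b ≠ k := fun h => by subst h; simp at hkb
    simp [hkb, beq_eq_false_iff_ne.mpr hne]

lemma pv_calcO_items (C : PySem.Dict Char Int) (hnd : C.keys.Nodup) (bwt : List Char) :
    (pvCalcO bwt C).items = C.keys.map (fun k => (k, pvOcol bwt k)) := by
  unfold pvCalcO
  induction bwt using List.reverseRecOn with
  | nil =>
    show (pvCalcOInit C).items = _
    unfold pvCalcOInit
    show (C.items.map (fun p => (p.1, ([0] : List Int)))) = _
    show _ = (C.items.map (fun p => p.1)).map (fun k => (k, pvOcol [] k))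
    rw [List.map_map]
    rfl
  | append_singleton bs b ih =>
    rw [List.foldl_append]
    simp only [List.foldl_cons, List.foldl_nil]
    exact pv_calcOStep_items C hnd bs b _ ih

lemma pv_altRun_eq (bs : List Char) (k : Char) : pvAltRun bs k = pvOcol bs k := by
  have main : ∀ bs : List Char, bs.foldl (fun (p : List Int × Int) b =>
      let acc := if b == k then p.2 + 1 else p.2
      (p.1 ++ [acc], acc)) ([0], 0) = (pvOcol bs k, (bs.count k : Int)) := by
    intro bs
    induction bs using List.reverseRecOn with
    | nil => simp [pvOcol]
    | append_singleton bs b ih =>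
      rw [List.foldl_append]
      simp only [List.foldl_cons, List.foldl_nil]
      rw [ih]
      show (pvOcol bs k ++ [if b == k then (bs.count k : Int) + 1 else (bs.count k : Int)],
            if b == k then (bs.count k : Int) + 1 else (bs.count k : Int))
          = (pvOcol (bs ++ [b]) k, ((bs ++ [b]).count k : Int))
      rw [pv_ocol_concat, List.count_append]
      by_cases hbk : (b == k) = true
      · have : b = k := eq_of_beq hbk
        subst this
        simp
      · have : b ≠ k := by simpa using hbk
        simp [hbk, this]
  unfold pvAltRun
  rw [main]

lemma pv_bwt_eq (x : String) :
    (pvYs x).map (fun i => PySem.List.pyGetD ((x ++ "$").toList)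
        (PySem.Int.mod (i + (PySem.Str.len (x ++ "$") - 1)) (PySem.Str.len (x ++ "$"))) ' ')
      = (pvYs x).map (fun i => PySem.List.pyGetD ((x ++ "$").toList) (i - 1) ' ') := by
  apply List.map_congr_left
  intro i hi
  obtain ⟨h0, hn⟩ := pv_mem_ys x hi
  have hxlen : PySem.Str.len (x ++ "$") = ((pvXs x).length : Int) := pv_xs_len x
  have hxs : (x ++ "$").toList = x.toList ++ ['$'] := by
    rw [String.toList_append]
    rfl
  have hlen : (pvXs x).length = x.toList.length + 1 := by
    unfold pvXs
    rw [hxs]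
    simp
  have hnpos : (0 : Int) < ((pvXs x).length : Int) := by
    rw [hlen]
    push_cast
    omega
  rw [hxlen]
  by_cases hi0 : i = 0
  · subst hi0
    have hmod : PySem.Int.mod (0 + (((pvXs x).length : Int) - 1)) ((pvXs x).length : Int)
        = ((pvXs x).length : Int) - 1 := by
      rw [PySem.Int.mod_eq_emod_of_pos hnpos]
      have hz : (0 : Int) + (((pvXs x).length : Int) - 1) = ((pvXs x).length : Int) - 1 := by
        ring
      rw [hz]
      exact Int.emod_eq_of_lt (by omega) (by omega)
    rw [hmod]
    rw [show (x ++ "$").toList = pvXs x from rfl]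
    have hxs' : pvXs x ≠ [] := by
      show (x ++ "$").toList ≠ []
      rw [hxs]
      simp
    rw [PySem.List.pyGetD_eq_getElem _ _ (by omega) (by omega)]
    rw [show (0 : Int) - 1 = -1 from rfl]
    rw [PySem.List.pyGetD_neg_one _ _ hxs']
    rw [List.getLast_eq_getElem]
    congr 1
    omega
  · have hipos : 0 < i := lt_of_le_of_ne h0 (Ne.symm hi0)
    have hmod : PySem.Int.mod (i + (((pvXs x).length : Int) - 1)) ((pvXs x).length : Int)
        = i - 1 := by
      rw [PySem.Int.mod_eq_emod_of_pos hnpos]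
      have hrw : i + (((pvXs x).length : Int) - 1)
          = (i - 1) + ((pvXs x).length : Int) * 1 := by
        ring
      rw [hrw, Int.add_mul_emod_self_left]
      exact Int.emod_eq_of_lt (by omega) (by omega)
    rw [hmod]

lemma pv_ofList_cs_lt (x : String) :
    (PySem.Set.ofList (pvCs x)).Pairwise (· < ·) := by
  have hle : (PySem.Set.ofList (pvCs x)).Pairwise (· ≤ ·) :=
    (pv_cs_sorted x).sublist (pv_ofList_sublist _)
  exact (hle.and (PySem.Set.nodup_ofList _)).imp (fun h => lt_of_le_of_ne h.1 h.2)

lemma pv_CA_keys (x : String) :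
    (pvCountToBucket (pvCs x)).keys = PySem.Set.ofList (pvCs x) := by
  show ((pvCountToBucket (pvCs x)).items).map (fun p => p.1) = _
  rw [pv_countToBucket_items, List.map_map]
  simp [Function.comp_def]

lemma pv_O_eq (C : PySem.Dict Char Int) (hnd : C.keys.Nodup) (bwt : List Char) :
    pvCalcO bwt C
      = C.keys.foldl (fun d c => d.insert c (pvAltRun bwt c)) PySem.Dict.empty := by
  apply PySem.Dict.ext
  rw [pv_calcO_items C hnd bwt]
  rw [PySem.Dict.items_foldl_insert_fresh C.keys (fun c => c) (fun c => pvAltRun bwt c)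
      PySem.Dict.empty (fun a _ => PySem.Dict.contains_empty a) (by simpa using hnd)]
  rw [show (PySem.Dict.empty : PySem.Dict Char (List Int)).items = [] from rfl,
      List.nil_append]
  apply List.map_congr_left
  intro k _
  rw [pv_altRun_eq]

lemma pv_C_eq (x : String) :
    pvCountToBucket (pvCs x)
      = (List.foldl (fun (p : PySem.Dict Char Int × Int) c =>
            (p.1.insert c p.2, p.2 +
              (List.foldl (fun (d : PySem.Dict Char Int) c => d.insert c (d.getD c 0 + 1))
                PySem.Dict.empty (pvXs x)).getD c 0))
          (PySem.Dict.empty, 0)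
          (PySem.List.sorted
            (List.foldl (fun (d : PySem.Dict Char Int) c => d.insert c (d.getD c 0 + 1))
              PySem.Dict.empty (pvXs x)).keys (fun c => c) false)).1 := by
  have hfreq : (List.foldl (fun (d : PySem.Dict Char Int) c => d.insert c (d.getD c 0 + 1))
      PySem.Dict.empty (pvXs x)) = PySem.Dict.counter (pvXs x) :=
    PySem.Dict.foldl_insert_getD_add_one_eq_counter _
  apply PySem.Dict.ext
  rw [pv_countToBucket_items]
  rw [show (PySem.List.sorted
        (List.foldl (fun (d : PySem.Dict Char Int) c => d.insert c (d.getD c 0 + 1))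
          PySem.Dict.empty (pvXs x)).keys (fun c => c) false)
      = PySem.Set.ofList (pvCs x) from pv_keys_eq x]
  rw [pv_cfold_items _ (PySem.Set.ofList (pvCs x)) PySem.Dict.empty 0
      (fun c _ => PySem.Dict.contains_empty c) (PySem.Set.nodup_ofList _)]
  rw [pv_canon_eq_map (PySem.Set.ofList (pvCs x)) (pvXs x) _ 0
      (pv_ofList_cs_lt x)
      (fun e he => (PySem.Set.mem_ofList _ _).mpr ((pv_cs_perm x).mem_iff.mpr he))
      (fun c _ => by rw [hfreq, PySem.Dict.getD_counter])]
  rw [show (PySem.Dict.empty : PySem.Dict Char Int).items = [] from rfl, List.nil_append]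
  apply List.map_congr_left
  intro c hc
  have hccs : c ∈ pvCs x := (PySem.Set.mem_ofList _ _).mp hc
  rw [pv_idxOf_sorted (pvCs x) (pv_cs_sorted x) c hccs,
      (pv_cs_perm x).countP_eq]
  simp

-- ===== VERDICT (by name: the statement is the Claim_ definition above) =====
theorem bwt_C_O_spec : Claim_equal_bwt_C_O := by
  intro x _
  show bwt_C_O x = bwt_C_O_alt x
  simp only [bwt_C_O, bwt_C_O_alt]
  rw [pv_sa_eq]
  rw [show (PySem.List.sorted (PySem.List.pyRange 0 (PySem.Str.len (x ++ "$")) 1)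
        (fun i => PySem.Str.slice (x ++ "$") (some i) none) false) = pvYs x from rfl]
  rw [pv_bwt_eq x]
  rw [show (x ++ "$").toList = pvXs x from rfl]
  rw [show List.map (fun i => PySem.List.pyGetD (pvXs x) i ' ') (pvYs x) = pvCs x from rfl]
  rw [← pv_C_eq x]
  rw [pv_O_eq (pvCountToBucket (pvCs x))
      (by rw [pv_CA_keys]; exact PySem.Set.nodup_ofList _) _]
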